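-- pv_equiv track=rewrite | github.com/BaquarAbbas/30-days-of-code- | Day16:RestructiveCandyCrush.py | Reduced_String
-- ===== SOURCE A (Python) =====
-- def Reduced_String(k, s):
--     count = []
--     stack = ""
--     emp = ''
--     if k == 1:
--         return emp
--     for i in range(len(s)):
--         if i == 0 or not stack or s[i]  != stack[-1]:
--             count.append(1)
--             stack += s[i]
--         else:
--             recount = count.pop() + 1
--             if recount == k:
--                 stack = stack[:len(stack)-1]
--
--             else:
--                 count .append(recount)
--     return "".join(map(lambda x,y:x*y,count,stack))
-- ===== SOURCE B (Python) =====
-- def Reduced_String(k, s):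
--     if k <= 0:
--         # run lengths are positive, so they can never reach a non-positive k
--         return s
--     # pass 1: run-length encode the string
--     runs = []
--     for ch in s:
--         if runs and runs[-1][0] == ch:
--             runs[-1][1] += 1
--         else:
--             runs.append([ch, 1])
--     # pass 2: fold the runs, keeping surviving run lengths modulo k
--     stack = []
--     for ch, n in runs:
--         if stack and stack[-1][0] == ch:
--             n += stack.pop()[1]
--         r = n % k
--         if r:
--             stack.append((ch, r))
--     return ''.join(ch * n for ch, n in stack)
-- ===== Notes on version B (the rewrite author's own statement) =====
-- stated objective: alternative
-- what changed: B replaces A's per-character stack machine (count list + string stack rebuilt by concatenation/slicing) by two staged passes: run-length encode the string, then fold the runs combining adjacent equal-char run lengths and keeping them modulo k, so removal is arithmetic on whole runs instead of per-character counting (k==1 falls out of the mod arithmetic instead of a special case).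
import Mathlib
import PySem

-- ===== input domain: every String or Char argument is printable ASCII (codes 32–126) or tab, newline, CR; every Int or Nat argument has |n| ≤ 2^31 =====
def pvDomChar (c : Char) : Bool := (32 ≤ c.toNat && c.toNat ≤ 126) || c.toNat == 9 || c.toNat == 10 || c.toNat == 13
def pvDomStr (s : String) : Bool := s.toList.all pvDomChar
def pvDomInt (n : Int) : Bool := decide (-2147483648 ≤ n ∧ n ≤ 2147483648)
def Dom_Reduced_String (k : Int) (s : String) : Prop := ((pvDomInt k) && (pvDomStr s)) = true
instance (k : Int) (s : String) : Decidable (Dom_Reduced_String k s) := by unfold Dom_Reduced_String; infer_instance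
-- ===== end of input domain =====

-- B replaces A's per-character stack machine by two staged passes: run-length encode the
-- string, then fold the runs keeping surviving run lengths modulo k (objective: alternative).

-- ===== PORT A =====
-- one loop iteration of A: state is (count, stack); count.pop() is exact here because
-- count and stack always have equal length, so count is nonempty whenever stack is
def pvStepA (k : Int) (acc : List Int × List Char) (p : Int × Char) : List Int × List Char :=
  if p.1 == 0 || acc.2.isEmpty || acc.2.getLast? != some p.2 then
    (acc.1 ++ [1], acc.2 ++ [p.2])
  else
    let recount := acc.1.getLast?.getD 0 + 1
    if recount == k then (acc.1.dropLast, acc.2.dropLast)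
    else (acc.1.dropLast ++ [recount], acc.2)

def Reduced_String (k : Int) (s : String) : String :=
  if k == 1 then "" else
    let r := (PySem.List.enumerate s.toList 0).foldl (pvStepA k) ([], [])
    String.mk (((r.1.zip r.2).map (fun p => List.replicate p.1.toNat p.2)).flatten)

-- ===== PORT B =====
-- 'runs[-1][1] += 1' is rendered immutably as rewriting the last cell
def pvRLEStep (runs : List (Char × Int)) (ch : Char) : List (Char × Int) :=
  match runs.getLast? with
  | some (c0, n) => if c0 == ch then runs.dropLast ++ [(c0, n + 1)] else runs ++ [(ch, 1)]
  | none => runs ++ [(ch, 1)]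

def pvStepM (k : Int) (st : List (Char × Int)) (p : Char × Int) : List (Char × Int) :=
  let n := match st.getLast? with
    | some q => if q.1 == p.1 then p.2 + q.2 else p.2
    | none => p.2
  let base := match st.getLast? with
    | some q => if q.1 == p.1 then st.dropLast else st
    | none => st
  let r := PySem.Int.mod n k
  if r == 0 then base else base ++ [(p.1, r)]

def Reduced_String_alt (k : Int) (s : String) : String :=
  if k ≤ 0 then s
  else
    let runs := s.toList.foldl pvRLEStep []
    let st := runs.foldl (pvStepM k) []
    String.mk ((st.map (fun p => List.replicate p.2.toNat p.1)).flatten)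

-- ===== PRECONDITION & SPEC =====
def Spec_Reduced_String (k : Int) (s : String) (out : String) : Prop := out = Reduced_String_alt k s
instance (k : Int) (s : String) (out : String) : Decidable (Spec_Reduced_String k s out) := by unfold Spec_Reduced_String; infer_instance

-- ===== CLAIM (what is proved, stated in full; the proofs are below) =====
def Claim_equal_Reduced_String : Prop := ∀ (k : Int) (s : String), Dom_Reduced_String k s → Spec_Reduced_String k s (Reduced_String k s)

-- ===== LEMMAS AND PROOFS =====

-- the per-character stack machine with (char, count) pairs: an intermediate between A and B
def pvStepC (k : Int) (st : List (Char × Int)) (ch : Char) : List (Char × Int) :=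
  match st.getLast? with
  | some (c0, n) =>
      if c0 == ch then
        if n + 1 == k then st.dropLast else st.dropLast ++ [(c0, n + 1)]
      else st ++ [(ch, 1)]
  | none => st ++ [(ch, 1)]

theorem pvStep_corr (k : Int) (i : Int) (c : Char) (st : List (Char × Int))
    (h : i = 0 → st = []) :
    pvStepA k (st.map Prod.snd, st.map Prod.fst) (i, c)
      = ((pvStepC k st c).map Prod.snd, (pvStepC k st c).map Prod.fst) := by
  induction st using List.reverseRecOn with
  | nil => simp [pvStepA, pvStepC]
  | append_singleton st' p _ =>
    obtain ⟨c0, n⟩ := p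
    have hi : ¬ (i = 0) := fun h0 => by simpa using h h0
    by_cases hc : c0 = c
    · subst hc
      by_cases hk : n + 1 = k
      · simp [pvStepA, pvStepC, hi, hk]
      · simp [pvStepA, pvStepC, hi, hk]
    · simp [pvStepA, pvStepC, hi, hc]

theorem pvFold_corr (k : Int) (cs : List Char) : ∀ (i : Int) (st : List (Char × Int)),
    0 ≤ i → (i = 0 → st = []) →
    (PySem.List.enumerate cs i).foldl (pvStepA k) (st.map Prod.snd, st.map Prod.fst)
      = ((cs.foldl (pvStepC k) st).map Prod.snd, (cs.foldl (pvStepC k) st).map Prod.fst) := by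
  induction cs with
  | nil => intro i st _ _; simp [PySem.List.enumerate]
  | cons c cs ih =>
    intro i st h0 h1
    rw [PySem.List.enumerate_cons, List.foldl_cons, List.foldl_cons,
      pvStep_corr k i c st h1]
    exact ih (i + 1) (pvStepC k st c) (by omega) (by omega)

-- run decomposition as a structural recursion (spec-side twin of pass 1)
def pvRuns : List Char → List (Char × Int)
  | [] => []
  | c :: cs =>
    match pvRuns cs with
    | (c0, n) :: rest => if c0 = c then (c, n + 1) :: rest else (c, 1) :: (c0, n) :: rest
    | [] => [(c, 1)]

def pvFlat (rs : List (Char × Int)) : List Char :=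
  (rs.map (fun p => List.replicate p.2.toNat p.1)).flatten

def pvMerge (acc rs : List (Char × Int)) : List (Char × Int) :=
  match rs with
  | [] => acc
  | (c, n) :: rest =>
    match acc.getLast? with
    | some (c0, m) => if c0 = c then acc.dropLast ++ (c0, m + n) :: rest else acc ++ (c, n) :: rest
    | none => acc ++ (c, n) :: rest

theorem pvRuns_cons (c : Char) (cs : List Char) :
    pvRuns (c :: cs) =
      match pvRuns cs with
      | (c0, n) :: rest => if c0 = c then (c, n + 1) :: rest else (c, 1) :: (c0, n) :: rest
      | [] => [(c, 1)] := rfl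

theorem pvRuns_pos (cs : List Char) : ∀ p ∈ pvRuns cs, 1 ≤ p.2 := by
  induction cs with
  | nil => simp [pvRuns]
  | cons c cs ih =>
    intro p hp
    rw [pvRuns_cons] at hp
    rcases hr : pvRuns cs with _ | ⟨⟨c0, n⟩, rest⟩ <;> rw [hr] at hp
    · simp at hp; simp [hp]
    · have hn : 1 ≤ n := ih (c0, n) (by rw [hr]; exact List.mem_cons_self)
      by_cases hc : c0 = c <;> simp [hc] at hp
      · rcases hp with hp | hp
        · simp [hp]; omega
        · exact ih p (by rw [hr]; exact List.mem_cons_of_mem _ hp)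
      · rcases hp with hp | hp | hp
        · simp [hp]
        · simp [hp, hn]
        · exact ih p (by rw [hr]; exact List.mem_cons_of_mem _ hp)

theorem pvFlat_pvRuns (cs : List Char) : pvFlat (pvRuns cs) = cs := by
  induction cs with
  | nil => simp [pvRuns, pvFlat]
  | cons c cs ih =>
    rw [pvRuns_cons]
    rcases hr : pvRuns cs with _ | ⟨⟨c0, n⟩, rest⟩
    · have : cs = [] := by rw [hr] at ih; simpa [pvFlat] using ih.symm
      simp [pvFlat, this]
    · have hn : 1 ≤ n := pvRuns_pos cs (c0, n) (by rw [hr]; exact List.mem_cons_self)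
      rw [hr] at ih
      by_cases hc : c0 = c
      · subst hc
        have h1 : (n + 1).toNat = n.toNat + 1 := by omega
        simp only [pvFlat, List.map_cons, List.flatten_cons] at ih ⊢
        simp [h1, List.replicate_succ, ih]
      · simp only [if_neg hc, pvFlat, List.map_cons, List.flatten_cons] at ih ⊢
        simpa using ih

theorem pvRLE_eq_pvRuns_aux (cs : List Char) : ∀ acc,
    cs.foldl pvRLEStep acc = pvMerge acc (pvRuns cs) := by
  induction cs with
  | nil => intro acc; simp [pvMerge, pvRuns]
  | cons c cs ih =>
    intro acc
    rw [List.foldl_cons, ih, pvRuns_cons]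
    have hcomm : ∀ m n : ℤ, m + n = n + m := fun m n => by ring
    rcases hr : pvRuns cs with _ | ⟨⟨c0', n'⟩, rest⟩
    · -- pvRuns cs = []
      rcases hl : acc.getLast? with _ | ⟨c0, m⟩
      · simp [pvMerge, pvRLEStep, hl]
      · by_cases hc : c0 = c
        · subst hc; simp [pvMerge, pvRLEStep, hl]
        · simp [pvMerge, pvRLEStep, hl, hc]
    · by_cases hc' : c0' = c
      · subst hc'
        rcases hl : acc.getLast? with _ | ⟨c0, m⟩
        · have : acc = [] := List.getLast?_eq_none_iff.mp hl
          subst this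
          simp [pvMerge, pvRLEStep, hcomm 1 n']
        · by_cases hc : c0 = c0'
          · subst hc
            simp [pvMerge, pvRLEStep, hl, List.getLast?_concat, List.dropLast_concat,
              add_comm, add_assoc, add_left_comm]
          · simp [pvMerge, pvRLEStep, hl, hc, List.getLast?_concat, List.dropLast_concat,
              add_comm, add_assoc, add_left_comm]
      · rcases hl : acc.getLast? with _ | ⟨c0, m⟩
        · have : acc = [] := List.getLast?_eq_none_iff.mp hl
          subst this
          simp [pvMerge, pvRLEStep, hc', Ne.symm hc']
        · by_cases hc : c0 = c
          · subst hc
            simp [pvMerge, pvRLEStep, hl, hc', Ne.symm hc', List.getLast?_concat,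
              List.dropLast_concat]
          · simp [pvMerge, pvRLEStep, hl, hc, hc', Ne.symm hc', List.getLast?_concat,
              List.dropLast_concat]

theorem pvRLE_eq_pvRuns (cs : List Char) : cs.foldl pvRLEStep [] = pvRuns cs := by
  rw [pvRLE_eq_pvRuns_aux cs []]
  rcases hr : pvRuns cs with _ | ⟨⟨c0, n⟩, rest⟩ <;> simp [pvMerge]

-- invariant of the per-character stack: adjacent chars differ, counts in [1, k)
def pvInv (k : Int) (st : List (Char × Int)) : Prop :=
  List.IsChain (fun p q => p.1 ≠ q.1) st ∧ ∀ p ∈ st, 1 ≤ p.2 ∧ p.2 < k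

theorem pvInv_nil (k : Int) : pvInv k [] := ⟨List.isChain_nil, by simp⟩

theorem pvInv_concat_iff (k : Int) (st : List (Char × Int)) (c0 : Char) (m : Int) :
    pvInv k (st ++ [(c0, m)]) ↔
      pvInv k st ∧ (1 ≤ m ∧ m < k) ∧ ∀ x ∈ st.getLast?, x.1 ≠ c0 := by
  unfold pvInv
  rw [List.isChain_append]
  simp only [List.isChain_singleton, true_and, and_true, List.mem_append,
    List.mem_singleton, List.head?_cons, Option.mem_some_iff]
  constructor
  · rintro ⟨⟨h1, h2⟩, h3⟩
    exact ⟨⟨h1, fun p hp => h3 p (Or.inl hp)⟩, h3 (c0, m) (Or.inr rfl),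
      fun x hx => h2 x hx (c0, m) rfl⟩
  · rintro ⟨⟨h1, h2⟩, hm, h3⟩
    refine ⟨⟨h1, fun x hx y hy => by rw [← hy]; exact h3 x hx⟩, ?_⟩
    rintro p (hp | rfl)
    · exact h2 p hp
    · exact hm

theorem pvMod_bounds (k n : Int) (hk : 2 ≤ k) :
    0 ≤ PySem.Int.mod n k ∧ PySem.Int.mod n k < k := by
  rw [PySem.Int.mod_eq_emod_of_pos (by omega)]
  exact ⟨Int.emod_nonneg n (by omega), Int.emod_lt_of_pos n (by omega)⟩

theorem pvStepM_inv (k : Int) (hk : 2 ≤ k) (st : List (Char × Int)) (c : Char) (n : Int)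
    (h : pvInv k st) : pvInv k (pvStepM k st (c, n)) := by
  induction st using List.reverseRecOn with
  | nil =>
    by_cases hr : PySem.Int.mod n k = 0
    · simp [pvStepM, hr, pvInv_nil]
    · obtain ⟨hb1, hb2⟩ := pvMod_bounds k n hk
      simp only [pvStepM, List.getLast?_nil]
      rw [if_neg (by simpa using hr)]
      exact (pvInv_concat_iff k [] c _).mpr ⟨pvInv_nil k, ⟨by omega, hb2⟩, by simp⟩
  | append_singleton st' p _ =>
    obtain ⟨c0, m⟩ := p
    obtain ⟨h1, hm, hne⟩ := (pvInv_concat_iff k st' c0 m).mp h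
    by_cases hc : c0 = c
    · subst hc
      obtain ⟨hb1, hb2⟩ := pvMod_bounds k (n + m) hk
      by_cases hr : PySem.Int.mod (n + m) k = 0
      · simpa [pvStepM, List.getLast?_concat, List.dropLast_concat, hr] using h1
      · simp only [pvStepM, List.getLast?_concat, beq_self_eq_true, if_true,
          List.dropLast_concat]
        rw [if_neg (by simpa using hr)]
        exact (pvInv_concat_iff k st' c0 _).mpr ⟨h1, ⟨by omega, hb2⟩, hne⟩
    · obtain ⟨hb1, hb2⟩ := pvMod_bounds k n hk
      by_cases hr : PySem.Int.mod n k = 0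
      · simpa [pvStepM, List.getLast?_concat, hc, hr] using h
      · simp only [pvStepM, List.getLast?_concat, (by simpa using hc : ¬ (c0 == c) = true),
          if_false, Bool.false_eq_true]
        rw [if_neg (by simpa using hr)]
        refine (pvInv_concat_iff k (st' ++ [(c0, m)]) c _).mpr ⟨h, ⟨by omega, hb2⟩, ?_⟩
        intro x hx
        rw [List.getLast?_concat] at hx
        simp at hx
        simp [← hx, hc]

theorem pvStepC_inv (k : Int) (hk : 2 ≤ k) (st : List (Char × Int)) (c : Char)
    (h : pvInv k st) : pvInv k (pvStepC k st c) := by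
  induction st using List.reverseRecOn with
  | nil =>
    simp only [pvStepC, List.getLast?_nil]
    exact (pvInv_concat_iff k [] c 1).mpr ⟨pvInv_nil k, ⟨le_refl 1, by omega⟩, by simp⟩
  | append_singleton st' p _ =>
    obtain ⟨c0, m⟩ := p
    obtain ⟨h1, hm, hne⟩ := (pvInv_concat_iff k st' c0 m).mp h
    by_cases hc : c0 = c
    · subst hc
      by_cases hk' : m + 1 = k
      · simpa [pvStepC, List.getLast?_concat, hk', List.dropLast_concat] using h1
      · simp only [pvStepC, List.getLast?_concat, beq_self_eq_true, if_true,
          List.dropLast_concat]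
        rw [if_neg (by simpa using hk')]
        exact (pvInv_concat_iff k st' c0 (m + 1)).mpr ⟨h1, ⟨by omega, by omega⟩, hne⟩
    · simp only [pvStepC, List.getLast?_concat, (by simpa using hc : ¬ (c0 == c) = true),
        if_false, Bool.false_eq_true]
      refine (pvInv_concat_iff k (st' ++ [(c0, m)]) c 1).mpr ⟨h, ⟨le_refl 1, by omega⟩, ?_⟩
      intro x hx
      rw [List.getLast?_concat] at hx
      simp at hx
      simp [← hx, hc]

theorem pvSR (k : Int) (hk : 2 ≤ k) (c : Char) : ∀ (n : Nat), 1 ≤ n →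
    ∀ st, pvInv k st →
    List.foldl (pvStepC k) st (List.replicate n c) = pvStepM k st (c, (n : Int)) := by
  intro n hn
  induction n, hn using Nat.le_induction with
  | base =>
    intro st h
    induction st using List.reverseRecOn with
    | nil =>
      have h1 : PySem.Int.mod 1 k = 1 := by
        rw [PySem.Int.mod_eq_emod_of_pos (by omega)]
        exact Int.emod_eq_of_lt (by omega) (by omega)
      simp [pvStepC, pvStepM, h1]
    | append_singleton st' p _ =>
      obtain ⟨c0, m⟩ := p
      obtain ⟨h1, hm, hne⟩ := (pvInv_concat_iff k st' c0 m).mp h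
      by_cases hc : c0 = c
      · subst hc
        by_cases hk' : m + 1 = k
        · have : PySem.Int.mod (1 + m) k = 0 := by
            rw [PySem.Int.mod_eq_emod_of_pos (by omega), show 1 + m = k by omega]
            simp
          simp [pvStepC, pvStepM, List.getLast?_concat, List.dropLast_concat, hk', this]
        · have hmod : PySem.Int.mod ((1:Int) + m) k = m + 1 := by
            rw [PySem.Int.mod_eq_emod_of_pos (by omega), show (1:Int) + m = m + 1 by ring]
            exact Int.emod_eq_of_lt (by omega) (by omega)
          simp only [Nat.cast_one, List.replicate_one, List.foldl_cons, List.foldl_nil,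
            pvStepC, pvStepM, List.getLast?_concat, beq_self_eq_true, if_true,
            List.dropLast_concat, hmod]
          rw [if_neg (by simpa using hk')]
          rw [if_neg (by simp; omega)]
      · have : PySem.Int.mod 1 k = 1 := by
          rw [PySem.Int.mod_eq_emod_of_pos (by omega)]
          exact Int.emod_eq_of_lt (by omega) (by omega)
        simp [pvStepC, pvStepM, List.getLast?_concat, hc, this]
  | succ n hn ih =>
    intro st h
    rw [List.replicate_succ, List.foldl_cons, ih (pvStepC k st c) (pvStepC_inv k hk st c h)]
    induction st using List.reverseRecOn with
    | nil =>
      simp [pvStepC, pvStepM, List.getLast?_concat, List.dropLast_concat, Nat.cast_add,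
        Nat.cast_one, add_comm, add_left_comm, add_assoc]
    | append_singleton st' p _ =>
      obtain ⟨c0, m⟩ := p
      obtain ⟨h1, hm, hne⟩ := (pvInv_concat_iff k st' c0 m).mp h
      by_cases hc : c0 = c
      · subst hc
        by_cases hk' : m + 1 = k
        · -- the stack popped: exposed top (if any) carries a different char
          have hstep : pvStepC k (st' ++ [(c0, m)]) c0 = st' := by
            simp [pvStepC, List.getLast?_concat, hk', List.dropLast_concat]
          rw [hstep]
          have hmod : PySem.Int.mod (n : Int) k = PySem.Int.mod ((n : Int) + 1 + m) k := by
            rw [PySem.Int.mod_eq_emod_of_pos (by omega),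
              PySem.Int.mod_eq_emod_of_pos (by omega),
              show (n : Int) + 1 + m = (n : Int) + k * 1 by omega,
              Int.add_mul_emod_self_left]
          rcases hl : st'.getLast? with _ | ⟨c1, m1⟩
          · simp only [pvStepM, hl, List.getLast?_concat, beq_self_eq_true, if_true,
              List.dropLast_concat, hmod]
            push_cast
            ring_nf
          · have hc1 : ¬ (c1 = c0) := by
              have := hne (c1, m1) (by rw [hl]; rfl)
              simpa using this
            simp only [pvStepM, hl, List.getLast?_concat, beq_self_eq_true, if_true,
              (by simpa using hc1 : ¬ (c1 == c0) = true), if_false, Bool.false_eq_true,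
              List.dropLast_concat, hmod]
            push_cast
            ring_nf
        · have hstep : pvStepC k (st' ++ [(c0, m)]) c0 = st' ++ [(c0, m + 1)] := by
            simp only [pvStepC, List.getLast?_concat, beq_self_eq_true, if_true]
            rw [if_neg (by simpa using hk'), List.dropLast_concat]
          rw [hstep]
          simp only [pvStepM, List.getLast?_concat, beq_self_eq_true, if_true,
            List.dropLast_concat]
          have : (n : Int) + (m + 1) = (n : Int) + 1 + m := by ring
          push_cast
          rw [this]
      · have hstep : pvStepC k (st' ++ [(c0, m)]) c = (st' ++ [(c0, m)]) ++ [(c, 1)] := by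
          simp [pvStepC, List.getLast?_concat, hc]
        rw [hstep]
        simp only [pvStepM, List.getLast?_concat, beq_self_eq_true, if_true,
          (by simpa using hc : ¬ (c0 == c) = true), if_false, List.dropLast_concat]
        push_cast
        ring_nf

theorem pvRunsFold (k : Int) (hk : 2 ≤ k) : ∀ (rs : List (Char × Int)),
    (∀ p ∈ rs, 1 ≤ p.2) → ∀ st, pvInv k st →
    List.foldl (pvStepC k) st (pvFlat rs) = List.foldl (pvStepM k) st rs := by
  intro rs
  induction rs with
  | nil => intro _ st _; simp [pvFlat]
  | cons p rs ih =>
    obtain ⟨c, n⟩ := p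
    intro hpos st h
    have hn : 1 ≤ n := hpos (c, n) List.mem_cons_self
    have h1n : 1 ≤ n.toNat := by omega
    simp only [pvFlat, List.map_cons, List.flatten_cons, List.foldl_append, List.foldl_cons]
    rw [pvSR k hk c n.toNat h1n st h, show ((n.toNat : Int)) = n by omega]
    exact ih (fun q hq => hpos q (List.mem_cons_of_mem _ hq)) _
      (pvStepM_inv k hk st c n h)

theorem pvM_one (rs : List (Char × Int)) : List.foldl (pvStepM 1) [] rs = [] := by
  induction rs with
  | nil => rfl
  | cons p rs ih =>
    rcases p with ⟨c, n⟩
    have : pvStepM 1 [] (c, n) = [] := by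
      simp [pvStepM, PySem.Int.mod_eq_emod_of_pos (a := n) (by norm_num : (0:Int) < 1)]
    simpa [this] using ih

theorem pvRLEStep_pos (st : List (Char × Int)) (c : Char)
    (h : ∀ p ∈ st, 1 ≤ p.2) : ∀ p ∈ pvRLEStep st c, 1 ≤ p.2 := by
  induction st using List.reverseRecOn with
  | nil => simp [pvRLEStep]
  | append_singleton st' q _ =>
    obtain ⟨c0, m⟩ := q
    have hm : 1 ≤ m := h (c0, m) (by simp)
    have hst' : ∀ p ∈ st', 1 ≤ p.2 := fun p hp => h p (List.mem_append_left _ hp)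
    intro p hp
    by_cases hc : c0 = c
    · subst hc
      simp only [pvRLEStep, List.getLast?_concat, beq_self_eq_true, if_true,
        List.dropLast_concat, List.mem_append, List.mem_singleton] at hp
      rcases hp with hp | hp
      · exact hst' p hp
      · simp [hp]; omega
    · simp only [pvRLEStep, List.getLast?_concat,
        (by simpa using hc : ¬ (c0 == c) = true), if_false, Bool.false_eq_true,
        List.mem_append, List.mem_singleton] at hp
      rcases hp with hp | hp
      · exact h p (by simpa using hp)
      · simp [hp]

theorem pvC_nopop (k : Int) (hk : k ≤ 0) : ∀ (cs : List Char) (st : List (Char × Int)),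
    (∀ p ∈ st, 1 ≤ p.2) → cs.foldl (pvStepC k) st = cs.foldl pvRLEStep st := by
  intro cs
  induction cs with
  | nil => intro st _; rfl
  | cons c cs ih =>
    intro st h
    have hstep : pvStepC k st c = pvRLEStep st c := by
      induction st using List.reverseRecOn with
      | nil => simp [pvStepC, pvRLEStep]
      | append_singleton st' q _ =>
        obtain ⟨c0, m⟩ := q
        have hm : 1 ≤ m := h (c0, m) (by simp)
        by_cases hc : c0 = c
        · subst hc
          simp only [pvStepC, pvRLEStep, List.getLast?_concat, beq_self_eq_true, if_true]
          rw [if_neg (by simp; omega)]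
        · simp [pvStepC, pvRLEStep, List.getLast?_concat, hc]
    rw [List.foldl_cons, List.foldl_cons, hstep]
    exact ih (pvRLEStep st c) (pvRLEStep_pos st c h)

-- A's output expression over the paired stack
theorem pvOut_pair (l : List (Char × Int)) :
    ((l.map Prod.snd).zip (l.map Prod.fst)).map (fun p => List.replicate p.1.toNat p.2)
      = l.map (fun p => List.replicate p.2.toNat p.1) := by
  induction l with
  | nil => rfl
  | cons p l ih => simp [ih]

-- ===== VERDICT (by name: the statement is the Claim_ definition above) =====
theorem Reduced_String_spec : Claim_equal_Reduced_String := by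
  intro k s _
  unfold Spec_Reduced_String Reduced_String Reduced_String_alt
  have h := pvFold_corr k s.toList 0 [] le_rfl (fun _ => rfl)
  simp only [List.map_nil] at h
  by_cases hk0 : k ≤ 0
  · -- k ≤ 0: nothing is ever removed, both sides return s
    have hne1 : ¬ ((k == 1) = true) := by simp; omega
    simp only [hne1, if_false, Bool.false_eq_true, if_pos hk0, h, pvOut_pair]
    rw [pvC_nopop k hk0 s.toList [] (by simp), pvRLE_eq_pvRuns]
    have h2 := pvFlat_pvRuns s.toList
    unfold pvFlat at h2
    rw [h2]
    simp [String.mk]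
  · by_cases hk1 : k = 1
    · subst hk1
      rw [if_pos (show ((1:Int) == 1) = true from rfl), if_neg (by omega : ¬ (1:Int) ≤ 0)]
      simp only [pvM_one, List.map_nil, List.flatten_nil]
      rfl
    · have hk2 : 2 ≤ k := by omega
      have hne1 : ¬ ((k == 1) = true) := by simpa using hk1
      have hC : List.foldl (pvStepC k) [] s.toList
          = List.foldl (pvStepM k) [] (pvRuns s.toList) := by
        conv_lhs => rw [← pvFlat_pvRuns s.toList]
        exact pvRunsFold k hk2 (pvRuns s.toList) (pvRuns_pos s.toList) [] (pvInv_nil k)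
      simp only [hne1, if_false, Bool.false_eq_true, if_neg hk0, h, pvOut_pair,
        pvRLE_eq_pvRuns, hC]
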